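-- pv_equiv track=rewrite | github.com/Parrot-Developers/ARSDKBuildUtils | Utils/Python/ARCommandsParser.py | ARCapitalize
-- ===== SOURCE A (Python) =====
-- def ARCapitalize (arstr):
--     nameParts = arstr.split('_')
--     name = ''
--     for part in nameParts:
--         if len(part) > 1:
--             name =  name + part[0].upper() + part[1:]
--         elif len(part) == 1:
--             name = name + part[0].upper()
--     return name
-- ===== SOURCE B (Python) =====
-- def ARCapitalize(arstr):
--     out = []
--     cap = True
--     for c in arstr:
--         if c == '_':
--             cap = True
--         elif cap:
--             out.append(c.upper())
--             cap = False
--         else: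
--             out.append(c)
--     return ''.join(out)
-- ===== Notes on version B (the rewrite author's own statement) =====
-- stated objective: alternative
-- what changed: Replaced splitting on underscores plus a per-part length-branching loop with a single left-to-right character scan carrying a capitalize-next flag.
import Mathlib
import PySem

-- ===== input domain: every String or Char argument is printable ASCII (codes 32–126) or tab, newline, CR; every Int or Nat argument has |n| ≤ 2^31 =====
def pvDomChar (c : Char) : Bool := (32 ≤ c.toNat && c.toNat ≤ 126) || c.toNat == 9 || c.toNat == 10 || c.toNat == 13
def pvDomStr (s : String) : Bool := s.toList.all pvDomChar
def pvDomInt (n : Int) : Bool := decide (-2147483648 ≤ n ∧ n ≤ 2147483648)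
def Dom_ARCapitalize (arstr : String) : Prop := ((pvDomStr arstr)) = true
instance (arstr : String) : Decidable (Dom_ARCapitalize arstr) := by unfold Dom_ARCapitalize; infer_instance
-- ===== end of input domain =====

-- B replaces split('_') + a per-part loop with one character scan carrying a capitalize-next flag (alternative decomposition, same cost).

-- ===== PORT A =====
-- part[0].upper() as a one-char list; the none branch is unreachable (guarded by the length tests)
def capFirst (part : List Char) : List Char :=
  match PySem.List.pyGet? part 0 with
  | some c => [PySem.Chars.upperChar c]
  | none => []

def ARCapitalize (arstr : String) : String :=
  let nameParts := PySem.Chars.splitOn arstr.toList ['_']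
  let name : List Char := nameParts.foldl (fun name part =>
    if part.length > 1 then
      name ++ capFirst part ++ PySem.List.slice part (some 1) none
    else if part.length = 1 then
      name ++ capFirst part
    else name) []
  String.ofList name

-- ===== PORT B =====
def ARCapitalize_alt (arstr : String) : String :=
  let r := arstr.toList.foldl (fun (st : List Char × Bool) c =>
    if c = '_' then (st.1, true)
    else if st.2 then (st.1 ++ [PySem.Chars.upperChar c], false)
    else (st.1 ++ [c], false)) ([], true)
  String.ofList r.1

-- ===== PRECONDITION & SPEC =====
def Spec_ARCapitalize (arstr : String) (out : String) : Prop := out = ARCapitalize_alt arstr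
instance (arstr : String) (out : String) : Decidable (Spec_ARCapitalize arstr out) := by unfold Spec_ARCapitalize; infer_instance

-- ===== CLAIM (what is proved, stated in full; the proofs are below) =====
def Claim_equal_ARCapitalize : Prop := ∀ (arstr : String), Dom_ARCapitalize arstr → Spec_ARCapitalize arstr (ARCapitalize arstr)

-- ===== LEMMAS AND PROOFS =====

-- reference splitter: mySplit pre l = the parts of pre ++ l, splitting l at '_'
def mySplit (pre : List Char) : List Char → List (List Char)
  | [] => [pre]
  | c :: rest => if c = '_' then pre :: mySplit [] rest else mySplit (pre ++ [c]) rest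

-- reference scan (B's loop body as a recursion)
def scan (cap : Bool) : List Char → List Char
  | [] => []
  | c :: rest =>
      if c = '_' then scan true rest
      else (if cap then PySem.Chars.upperChar c else c) :: scan false rest

-- what A appends for one part
def capOf (part : List Char) : List Char :=
  match part with
  | [] => []
  | h :: t => PySem.Chars.upperChar h :: t

theorem go_spec : ∀ (fuel : Nat) (l cur : List Char) (accs : List (List Char)),
    l.length ≤ fuel →
    PySem.Chars.splitOn.go ['_'] fuel l cur accs = accs.reverse ++ mySplit cur.reverse l := by
  intro fuel
  induction fuel with
  | zero =>
    intro l cur accs h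
    have : l = [] := List.eq_nil_of_length_eq_zero (Nat.le_zero.mp h)
    subst this
    simp [PySem.Chars.splitOn.go, mySplit]
  | succ f ih =>
    intro l cur accs h
    cases l with
    | nil => simp [PySem.Chars.splitOn.go, mySplit]
    | cons c rest =>
      by_cases hc : c = '_'
      · subst hc
        have hp : List.isPrefixOf ['_'] ('_' :: rest) = true := by simp [List.isPrefixOf]
        simp only [PySem.Chars.splitOn.go, hp, if_pos]
        rw [show List.drop ['_'].length ('_' :: rest) = rest from rfl]
        rw [ih rest [] (cur.reverse :: accs) (by simpa using Nat.le_of_succ_le_succ h)]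
        simp [mySplit]
      · have hp : List.isPrefixOf ['_'] (c :: rest) = false := by
          simp [List.isPrefixOf]; exact fun h' => hc h'.symm
        simp only [PySem.Chars.splitOn.go, hp]
        rw [if_neg (by simp)]
        rw [ih rest (c :: cur) accs (Nat.le_of_succ_le_succ h)]
        simp [mySplit, hc]

theorem splitOn_eq_mySplit (l : List Char) :
    PySem.Chars.splitOn l ['_'] = mySplit [] l := by
  unfold PySem.Chars.splitOn
  simpa using go_spec (l.length + 1) l [] [] (Nat.le_succ _)

theorem foldlA (parts : List (List Char)) (name : List Char) :
    parts.foldl (fun name part =>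
      if part.length > 1 then
        name ++ capFirst part ++ PySem.List.slice part (some 1) none
      else if part.length = 1 then
        name ++ capFirst part
      else name) name = name ++ parts.flatMap capOf := by
  induction parts generalizing name with
  | nil => simp
  | cons p ps ih =>
    have hstep : (if p.length > 1 then
        name ++ capFirst p ++ PySem.List.slice p (some 1) none
      else if p.length = 1 then name ++ capFirst p else name) = name ++ capOf p := by
      cases p with
      | nil => simp [capOf]
      | cons h t =>
        cases t with
        | nil => simp [capOf, capFirst]
        | cons h2 t2 =>
          have hl : (h :: h2 :: t2).length > 1 := by simp
          rw [if_pos hl]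
          simp [capOf, capFirst, PySem.List.slice]
    simp only [List.foldl_cons, hstep, List.flatMap_cons]
    rw [ih]
    simp

theorem flat_mySplit : ∀ (l pre : List Char),
    (mySplit pre l).flatMap capOf =
      (match pre with
       | [] => scan true l
       | h :: t => PySem.Chars.upperChar h :: t ++ scan false l) := by
  intro l
  induction l with
  | nil =>
    intro pre
    cases pre <;> simp [mySplit, capOf, scan]
  | cons c rest ih =>
    intro pre
    by_cases hc : c = '_'
    · subst hc
      simp only [mySplit]
      cases pre <;> simp [capOf, scan, ih []]
    · simp only [mySplit, if_neg hc]
      rw [ih (pre ++ [c])]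
      cases pre with
      | nil => simp [scan, hc]
      | cons h t => simp [scan, hc]

theorem foldlB (l : List Char) (acc : List Char) (cap : Bool) :
    (l.foldl (fun (st : List Char × Bool) c =>
      if c = '_' then (st.1, true)
      else if st.2 then (st.1 ++ [PySem.Chars.upperChar c], false)
      else (st.1 ++ [c], false)) (acc, cap)).1 = acc ++ scan cap l := by
  induction l generalizing acc cap with
  | nil => simp [scan]
  | cons c rest ih =>
    by_cases hc : c = '_'
    · subst hc
      simp only [List.foldl_cons, scan]
      exact ih acc true
    · cases cap <;> simp only [List.foldl_cons, if_neg hc, scan] <;>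
        simp [ih]

-- ===== VERDICT (by name: the statement is the Claim_ definition above) =====
theorem ARCapitalize_spec : Claim_equal_ARCapitalize := by
  intro arstr _
  unfold Spec_ARCapitalize ARCapitalize ARCapitalize_alt
  simp only [splitOn_eq_mySplit, foldlA, foldlB, flat_mySplit, List.nil_append]
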